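-- pv_equiv track=rewrite | github.com/jyc0011/backjoon | 백준/Silver/3085. 사탕 게임/사탕 게임.py | cnt_max
-- ===== SOURCE A (Python) =====
-- def cnt_max(board, N):
--     max_ = 1
--     for i in range(N):
--         row_count = 1
--         for j in range(1, N):
--             if board[i][j] == board[i][j-1]:
--                 row_count += 1
--                 max_ = max(max_, row_count)
--             else:
--                 row_count = 1
--         col_count = 1
--         for j in range(1, N):
--             if board[j][i] == board[j-1][i]:
--                 col_count += 1
--                 max_ = max(max_, col_count)
--             else:
--                 col_count = 1
--     return max_
-- ===== SOURCE B (Python) =====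
-- def cnt_max(board, N):
--     # Binary search on the answer length k; feasibility = some length-k
--     # row or column window is constant (all adjacent cells in it equal).
--     def ok(k):
--         for i in range(N):
--             for j in range(N - k + 1):
--                 if all(board[i][j + t] == board[i][j + t - 1] for t in range(1, k)):
--                     return True
--                 if all(board[j + t][i] == board[j + t - 1][i] for t in range(1, k)):
--                     return True
--         return False
--
--     lo, hi = 1, max(N, 1)
--     while lo < hi:
--         mid = (lo + hi + 1) // 2
--         if ok(mid):
--             lo = mid
--         else:
--             hi = mid - 1
--     return lo
-- ===== Notes on version B (the rewrite author's own statement) =====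
-- stated objective: alternative
-- what changed: B binary-searches the answer length k over [1, N] and decides feasibility of each k by testing whether some length-k horizontal or vertical window of the board is constant (all adjacent cells in the window equal), instead of A's linear running-count scans of every row and column.
import Mathlib
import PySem

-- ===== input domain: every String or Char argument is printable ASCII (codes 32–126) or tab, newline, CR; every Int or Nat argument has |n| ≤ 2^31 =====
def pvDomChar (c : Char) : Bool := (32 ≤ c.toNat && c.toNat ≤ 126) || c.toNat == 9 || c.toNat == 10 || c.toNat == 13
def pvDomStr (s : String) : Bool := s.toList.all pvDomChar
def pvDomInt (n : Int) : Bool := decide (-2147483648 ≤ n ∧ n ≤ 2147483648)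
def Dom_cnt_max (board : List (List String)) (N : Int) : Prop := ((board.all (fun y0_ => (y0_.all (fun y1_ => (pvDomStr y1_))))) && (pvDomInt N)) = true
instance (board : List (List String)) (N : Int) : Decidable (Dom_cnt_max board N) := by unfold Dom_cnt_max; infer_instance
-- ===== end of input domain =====

-- B replaces A's linear running-count row/column scans by a binary search on the answer
-- length k, deciding feasibility of k by testing whether some length-k row or column
-- window is constant (alternative algorithm, not claimed faster).


-- ===== PORT A =====
-- indexing board[i], board[i][j] ported with pyGetD: exact under Pre_ (all indices in range there)
def cnt_max (board : List (List String)) (N : Int) : Int :=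
  (PySem.List.pyRange 0 N 1).foldl (fun max_ i =>
    ((PySem.List.pyRange 1 N 1).foldl (fun (p : Int × Int) j =>
      if PySem.List.pyGetD (PySem.List.pyGetD board j []) i "" =
         PySem.List.pyGetD (PySem.List.pyGetD board (j - 1) []) i "" then
        (max p.1 (p.2 + 1), p.2 + 1)
      else (p.1, 1))
      (((PySem.List.pyRange 1 N 1).foldl (fun (p : Int × Int) j =>
        if PySem.List.pyGetD (PySem.List.pyGetD board i []) j "" =
           PySem.List.pyGetD (PySem.List.pyGetD board i []) (j - 1) "" then
          (max p.1 (p.2 + 1), p.2 + 1)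
        else (p.1, 1)) (max_, 1)).1, 1)).1) 1

-- ===== PORT B =====
-- B's feasibility test ok(k): some length-k row or column window is constant;
-- early-returning for-loops / all(...) generators ported as List.any / List.all
def pvOk (board : List (List String)) (N : Int) (k : Int) : Bool :=
  (PySem.List.pyRange 0 N 1).any (fun i =>
    (PySem.List.pyRange 0 (N - k + 1) 1).any (fun j =>
      ((PySem.List.pyRange 1 k 1).all (fun t =>
        PySem.List.pyGetD (PySem.List.pyGetD board i []) (j + t) "" ==
        PySem.List.pyGetD (PySem.List.pyGetD board i []) (j + t - 1) "")) ||
      ((PySem.List.pyRange 1 k 1).all (fun t =>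
        PySem.List.pyGetD (PySem.List.pyGetD board (j + t) []) i "" ==
        PySem.List.pyGetD (PySem.List.pyGetD board (j + t - 1) []) i ""))))

-- B's while-loop: binary search on the answer; mid = (lo+hi+1)//2 written inline.
-- The loop shrinks hi-lo by at least 1 per step, so fuel = hi0-lo0 makes it total.
def pvBsearch (board : List (List String)) (N : Int) : ℕ → Int → Int → Int
  | 0, lo, _ => lo
  | fuel + 1, lo, hi =>
    if lo < hi then
      if pvOk board N (PySem.Int.floordiv (lo + hi + 1) 2) then
        pvBsearch board N fuel (PySem.Int.floordiv (lo + hi + 1) 2) hi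
      else
        pvBsearch board N fuel lo (PySem.Int.floordiv (lo + hi + 1) 2 - 1)
    else lo

def cnt_max_alt (board : List (List String)) (N : Int) : Int :=
  pvBsearch board N (max N 1 - 1).toNat 1 (max N 1)

-- ===== PRECONDITION & SPEC =====
-- Pre_ excludes exactly the inputs on which A raises IndexError: N ≥ 2 with a board
-- whose first N rows are missing or shorter than N (for N ≤ 1 A indexes nothing).
def Pre_cnt_max (board : List (List String)) (N : Int) : Prop :=
  N ≤ 1 ∨ (N ≤ (board.length : Int) ∧ ∀ row ∈ board.take N.toNat, N ≤ (row.length : Int))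
instance (board : List (List String)) (N : Int) : Decidable (Pre_cnt_max board N) := by
  unfold Pre_cnt_max; infer_instance

def pvWitness_cnt_max : List (List String) × Int := ([["a", "a"], ["b", "a"]], 2)

def Spec_cnt_max (board : List (List String)) (N : Int) (out : Int) : Prop := out = cnt_max_alt board N
instance (board : List (List String)) (N : Int) (out : Int) : Decidable (Spec_cnt_max board N out) := by unfold Spec_cnt_max; infer_instance

-- ===== CLAIM (what is proved, stated in full; the proofs are below) =====
def Claim_equal_cnt_max : Prop := ∀ (board : List (List String)) (N : Int), Dom_cnt_max board N → Pre_cnt_max board N → Spec_cnt_max board N (cnt_max board N)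

-- ===== LEMMAS AND PROOFS =====

-- step of A's scan, on the pair (previous element, current element)
def pvStepA (p : Int × Int) (q : String × String) : Int × Int :=
  if q.2 = q.1 then (max p.1 (p.2 + 1), p.2 + 1) else (p.1, 1)

-- step of a canonical scan, phrased on the same pairs (best updated with max on every step)
def pvStepB (p : Int × Int) (q : String × String) : Int × Int :=
  (max p.1 (if q.2 = q.1 then p.2 + 1 else 1), if q.2 = q.1 then p.2 + 1 else 1)

-- canonical max-run value of a line
def pvMR (ys : List String) : Int := ((ys.zip (ys.drop 1)).foldl pvStepB (1, 1)).1

theorem pvStepB_mono : ∀ (l : List (String × String)) (b c : Int), b ≤ (l.foldl pvStepB (b, c)).1 := by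
  intro l
  induction l with
  | nil => intro b c; exact le_refl b
  | cons q t ih =>
      intro b c
      exact le_trans (le_max_left b _) (ih _ _)

theorem pvA_max : ∀ (l : List (String × String)) (m b c : Int), 1 ≤ m → b ≤ m →
    (l.foldl pvStepA (m, c)).1 = max m ((l.foldl pvStepB (b, c)).1) := by
  intro l
  induction l with
  | nil =>
      intro m b c hm hb
      simp only [List.foldl_nil]
      omega
  | cons q t ih =>
      intro m b c hm hb
      by_cases h : q.2 = q.1
      · simp only [List.foldl_cons, pvStepA, pvStepB, if_pos h]
        rw [ih (max m (c + 1)) (max b (c + 1)) (c + 1) (by omega) (by omega)]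
        have hX := pvStepB_mono t (max b (c + 1)) (c + 1)
        omega
      · simp only [List.foldl_cons, pvStepA, pvStepB, if_neg h]
        exact ih m (max b 1) 1 hm (by omega)

-- an index fold over range(len-1) of adjacent pairs is the fold over zip(ys, ys[1:])
theorem pvRangeZip {σ : Type} (f : σ → String × String → σ) :
    ∀ (ys : List String) (init : σ),
      (List.range (ys.length - 1)).foldl (fun s k => f s (ys.getD k "", ys.getD (k + 1) "")) init
        = (ys.zip (ys.drop 1)).foldl f init := by
  intro ys
  induction ys with
  | nil => intro init; simp
  | cons y t ih =>
      intro init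
      cases t with
      | nil => simp
      | cons y2 t' =>
          have hlen : (y :: y2 :: t').length - 1 = t'.length + 1 := by simp
          rw [hlen, List.range_succ_eq_map, List.foldl_cons, List.foldl_map]
          have h1 : ∀ (s : σ) (k : ℕ),
              f s ((y :: y2 :: t').getD (k + 1) "", (y :: y2 :: t').getD (k + 1 + 1) "")
                = f s ((y2 :: t').getD k "", (y2 :: t').getD (k + 1) "") := by
            intro s k; simp
          have h0 : f init ((y :: y2 :: t').getD 0 "", (y :: y2 :: t').getD 1 "") = f init (y, y2) := by
            simp
          have := ih (f init (y, y2))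
          simp only [List.length_cons, Nat.add_sub_cancel] at this
          calc (List.range t'.length).foldl
                  (fun s k => f s ((y :: y2 :: t').getD (k + 1) "", (y :: y2 :: t').getD (k + 1 + 1) ""))
                  (f init ((y :: y2 :: t').getD 0 "", (y :: y2 :: t').getD 1 ""))
              = (List.range t'.length).foldl
                  (fun s k => f s ((y2 :: t').getD k "", (y2 :: t').getD (k + 1) ""))
                  (f init (y, y2)) := by
                rw [h0]
                exact PySem.List.foldl_congr_mem _ _ _ _ (fun s k _ => h1 s k)
            _ = ((y2 :: t').zip ((y2 :: t').drop 1)).foldl f (f init (y, y2)) := this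
            _ = ((y :: y2 :: t').zip ((y :: y2 :: t').drop 1)).foldl f init := by
                simp [List.zip]

-- A's inner loop over pyRange 1 len 1, reading through a getter, is the zip fold
theorem pvIdxLine {σ : Type} (f : σ → String × String → σ) (g : Int → String) (ys : List String)
    (h : ∀ k : ℕ, k < ys.length → g (k : Int) = ys.getD k "") (init : σ) :
    (PySem.List.pyRange 1 (ys.length : Int) 1).foldl (fun s j => f s (g (j - 1), g j)) init
      = (ys.zip (ys.drop 1)).foldl f init := by
  rw [PySem.List.pyRange_one, List.foldl_map]
  have hT : ((ys.length : Int) - 1).toNat = ys.length - 1 := by omega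
  rw [hT]
  rw [← pvRangeZip f ys init]
  refine PySem.List.foldl_congr_mem _ _ _ _ ?_
  intro s k hk
  rw [List.mem_range] at hk
  have e1 : (1 : Int) + (k : Int) - 1 = (k : Int) := by ring
  have e2 : (1 : Int) + (k : Int) = ((k + 1 : ℕ) : Int) := by push_cast; ring
  rw [e1, e2, h k (by omega), h (k + 1) (by omega)]

-- fold congruence under the invariant 1 ≤ accumulator
theorem pvFoldCongrGE {α : Type} (f g : Int → α → Int)
    (hg : ∀ m x, 1 ≤ m → 1 ≤ g m x) :
    ∀ (l : List α), (∀ m x, x ∈ l → 1 ≤ m → f m x = g m x) →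
      ∀ m, 1 ≤ m → l.foldl f m = l.foldl g m := by
  intro l
  induction l with
  | nil => intro _ m _; rfl
  | cons x t ih =>
      intro h m hm
      simp only [List.foldl_cons]
      rw [h m x (by simp) hm]
      exact ih (fun m y hy hm' => h m y (List.mem_cons_of_mem _ hy) hm') (g m x) (hg m x hm)

-- getD through take
theorem pvGetDTake {α : Type} (r : List α) (d : α) (n k : ℕ) (hk : k < n) (hn : n ≤ r.length) :
    (r.take n).getD k d = r.getD k d := by
  have h1 : k < (r.take n).length := by simp; omega
  have h2 : k < r.length := by omega
  rw [List.getD_eq_getElem _ _ h1, List.getD_eq_getElem _ _ h2]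
  simp [List.getElem_take]

-- ----- run-length structure of a line: lead / streak on the adjacent-equality list -----

def pvMrB : Int → List Bool → Int
  | c, [] => c
  | c, b :: t => if b then pvMrB (c + 1) t else max c (pvMrB 1 t)

def pvLead : List Bool → Int
  | [] => 0
  | b :: t => if b then 1 + pvLead t else 0

def pvStreak : List Bool → Int
  | [] => 0
  | b :: t => max (pvLead (b :: t)) (pvStreak t)

theorem pvMrB_ge : ∀ (l : List Bool) (c : Int), c ≤ pvMrB c l := by
  intro l
  induction l with
  | nil => intro c; exact le_refl c
  | cons b t ih =>
      intro c
      by_cases h : b = true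
      · simp only [pvMrB, if_pos h]
        exact le_trans (by omega) (ih (c + 1))
      · simp only [pvMrB, if_neg h]
        exact le_max_left _ _

theorem pvLead_nonneg : ∀ (l : List Bool), 0 ≤ pvLead l := by
  intro l
  induction l with
  | nil => exact le_refl 0
  | cons b t ih => by_cases h : b = true <;> simp [pvLead, h]; omega

theorem pvStreak_nonneg : ∀ (l : List Bool), 0 ≤ pvStreak l := by
  intro l
  induction l with
  | nil => exact le_refl 0
  | cons b t ih =>
      have := pvLead_nonneg (b :: t)
      simp only [pvStreak]
      omega

theorem pvLead_le_length : ∀ (l : List Bool), pvLead l ≤ (l.length : Int) := by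
  intro l
  induction l with
  | nil => simp [pvLead]
  | cons b t ih =>
      by_cases h : b = true <;> simp [pvLead, h] <;> omega

theorem pvStreak_le_length : ∀ (l : List Bool), pvStreak l ≤ (l.length : Int) := by
  intro l
  induction l with
  | nil => simp [pvStreak]
  | cons b t ih =>
      have h1 := pvLead_le_length (b :: t)
      simp only [pvStreak, List.length_cons] at *
      push_cast at *
      omega

theorem pvLead_le_streak : ∀ (l : List Bool), pvLead l ≤ pvStreak l := by
  intro l
  cases l with
  | nil => exact le_refl 0
  | cons b t => exact le_max_left _ _

theorem pvMrB_formula : ∀ (l : List Bool) (c : Int), 1 ≤ c →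
    pvMrB c l = max (c + pvLead l) (1 + pvStreak l) := by
  intro l
  induction l with
  | nil => intro c hc; simp [pvMrB, pvLead, pvStreak]; omega
  | cons b t ih =>
      intro c hc
      by_cases h : b = true
      · simp only [pvMrB, pvLead, pvStreak, if_pos h]
        rw [ih (c + 1) (by omega)]
        omega
      · simp only [pvMrB, pvLead, pvStreak, if_neg h]
        rw [ih 1 (le_refl 1)]
        have h1 := pvLead_le_streak t
        have h2 := pvStreak_nonneg t
        have h3 := pvLead_nonneg t
        omega

theorem pvFoldB_eq_mrB : ∀ (ps : List (String × String)) (b c : Int), 1 ≤ c → c ≤ b →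
    (ps.foldl pvStepB (b, c)).1 = max b (pvMrB c (ps.map (fun q => q.2 == q.1))) := by
  intro ps
  induction ps with
  | nil =>
      intro b c hc hcb
      simp only [List.foldl_nil, List.map_nil, pvMrB]
      omega
  | cons q t ih =>
      intro b c hc hcb
      by_cases h : q.2 = q.1
      · simp only [List.foldl_cons, List.map_cons, pvStepB, pvMrB, h, beq_self_eq_true,
          if_true]
        rw [ih (max b (c + 1)) (c + 1) (by omega) (by omega)]
        have := pvMrB_ge (t.map (fun q => q.2 == q.1)) (c + 1)
        omega
      · have hb : (q.2 == q.1) = false := by simp [h]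
        simp only [List.foldl_cons, List.map_cons, pvStepB, pvMrB, if_neg h, hb, Bool.false_eq_true,
          if_false]
        rw [ih (max b 1) 1 (le_refl 1) (by omega)]
        have := pvMrB_ge (t.map (fun q => q.2 == q.1)) 1
        omega

-- adjacent-equality flags of a line
def pvEqs (ys : List String) : List Bool := (ys.zip (ys.drop 1)).map (fun q => q.2 == q.1)

theorem pvMR_eq (ys : List String) : pvMR ys = 1 + pvStreak (pvEqs ys) := by
  unfold pvMR pvEqs
  rw [pvFoldB_eq_mrB _ 1 1 (le_refl 1) (le_refl 1)]
  rw [pvMrB_formula _ 1 (le_refl 1)]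
  have h1 := pvLead_le_streak ((ys.zip (ys.drop 1)).map (fun q => q.2 == q.1))
  have h2 := pvStreak_nonneg ((ys.zip (ys.drop 1)).map (fun q => q.2 == q.1))
  omega

theorem pvEqs_length (ys : List String) : (pvEqs ys).length = ys.length - 1 := by
  simp [pvEqs]

theorem pvEqs_getD (ys : List String) (p : ℕ) (hp : p + 1 < ys.length) :
    (pvEqs ys).getD p false = (ys.getD (p + 1) "" == ys.getD p "") := by
  have hl : p < (pvEqs ys).length := by rw [pvEqs_length]; omega
  rw [List.getD_eq_getElem _ _ hl,
      List.getD_eq_getElem _ _ (show p + 1 < ys.length by omega),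
      List.getD_eq_getElem _ _ (show p < ys.length by omega)]
  simp [pvEqs]

-- windows of true flags vs streak
theorem pvLead_spec₁ : ∀ (l : List Bool) (m : ℕ), m ≤ l.length →
    (∀ s : ℕ, s < m → l.getD s false = true) → (m : Int) ≤ pvLead l := by
  intro l
  induction l with
  | nil =>
      intro m hm _
      have h0 : m = 0 := Nat.le_zero.mp (by simpa using hm)
      simp [h0, pvLead]
  | cons b t ih =>
      intro m hm hw
      cases m with
      | zero => have := pvLead_nonneg (b :: t); omega
      | succ m' =>
          have hb : b = true := by
            have := hw 0 (by omega); simpa using this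
          have hrec := ih m' (by simpa using hm) (fun s hs => by
            have := hw (s + 1) (by omega); simpa using this)
          simp only [pvLead, if_pos hb]
          push_cast
          omega

theorem pvLead_spec₂ : ∀ (l : List Bool) (s : ℕ), (s : Int) < pvLead l → l.getD s false = true := by
  intro l
  induction l with
  | nil => intro s h; simp [pvLead] at h; omega
  | cons b t ih =>
      intro s h
      by_cases hb : b = true
      · cases s with
        | zero => simpa using hb
        | succ s' =>
            simp only [pvLead, if_pos hb] at h
            have := ih s' (by push_cast at h ⊢; omega)
            simpa using this
      · simp only [pvLead, if_neg hb] at h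
        omega

theorem pvWindow_iff_streak : ∀ (l : List Bool) (m : ℕ),
    (∃ j : ℕ, j + m ≤ l.length ∧ ∀ s : ℕ, s < m → l.getD (j + s) false = true)
      ↔ (m : Int) ≤ pvStreak l := by
  intro l
  induction l with
  | nil =>
      intro m
      constructor
      · rintro ⟨j, hj, _⟩
        simp only [List.length_nil] at hj
        have : m = 0 := by omega
        simp [this, pvStreak]
      · intro h
        simp only [pvStreak] at h
        have : m = 0 := by omega
        exact ⟨0, by simp [this], by omega⟩
  | cons b t ih =>
      intro m
      constructor
      · rintro ⟨j, hj, hw⟩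
        cases j with
        | zero =>
            have h1 : (m : Int) ≤ pvLead (b :: t) :=
              pvLead_spec₁ (b :: t) m (by simpa using hj) (fun s hs => by
                have := hw s hs; simpa using this)
            simp only [pvStreak]
            omega
        | succ j' =>
            have h1 : (m : Int) ≤ pvStreak t := (ih m).mp ⟨j', by simp only [List.length_cons] at hj; omega, fun s hs => by
              have := hw s hs
              have e : j' + 1 + s = (j' + s) + 1 := by omega
              rw [e] at this
              simpa using this⟩
            simp only [pvStreak]
            omega
      · intro h
        simp only [pvStreak] at h
        by_cases h1 : (m : Int) ≤ pvLead (b :: t)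
        · refine ⟨0, ?_, ?_⟩
          · have := pvLead_le_length (b :: t)
            simp only [List.length_cons] at *
            omega
          · intro s hs
            have : (s : Int) < pvLead (b :: t) := by push_cast; omega
            simpa using pvLead_spec₂ (b :: t) s this
        · have h2 : (m : Int) ≤ pvStreak t := by omega
          obtain ⟨j, hj, hw⟩ := (ih m).mpr h2
          refine ⟨j + 1, by simp; omega, ?_⟩
          intro s hs
          have e : j + 1 + s = (j + s) + 1 := by omega
          rw [e]
          simpa using hw s hs

-- per-line: an adjacent-equal window of length k exists iff k ≤ max run
theorem pvLineWin (ys : List String) (k : ℕ) (hk : 1 ≤ k) (hn : 1 ≤ ys.length) :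
    (∃ j : ℕ, j + k ≤ ys.length ∧
        ∀ t : ℕ, 1 ≤ t → t < k → ys.getD (j + t) "" = ys.getD (j + t - 1) "")
      ↔ (k : Int) ≤ pvMR ys := by
  rw [pvMR_eq]
  have hle := pvEqs_length ys
  have hcast : ((k - 1 : ℕ) : Int) = (k : Int) - 1 := by omega
  constructor
  · rintro ⟨j, hjk, hw⟩
    have h1 : ((k - 1 : ℕ) : Int) ≤ pvStreak (pvEqs ys) := by
      refine (pvWindow_iff_streak (pvEqs ys) (k - 1)).mp ⟨j, by omega, ?_⟩
      intro s hs
      rw [pvEqs_getD ys (j + s) (by omega), beq_iff_eq]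
      have := hw (s + 1) (by omega) (by omega)
      have e1 : j + (s + 1) = j + s + 1 := by omega
      rw [e1] at this
      rw [show j + s + 1 - 1 = j + s by omega] at this
      exact this
    omega
  · intro h
    have h1 : ((k - 1 : ℕ) : Int) ≤ pvStreak (pvEqs ys) := by omega
    obtain ⟨j, hj, hw⟩ := (pvWindow_iff_streak (pvEqs ys) (k - 1)).mpr h1
    refine ⟨j, by omega, ?_⟩
    intro t ht1 htk
    have := hw (t - 1) (by omega)
    rw [pvEqs_getD ys (j + (t - 1)) (by omega), beq_iff_eq] at this
    have e1 : j + (t - 1) + 1 = j + t := by omega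
    have e2 : j + (t - 1) = j + t - 1 := by omega
    rw [e1, e2] at this
    exact this

-- Int-indexed getter version of the window characterisation
theorem pvGetWin (g : Int → String) (ys : List String) (n : ℕ) (k : Int)
    (hlen : ys.length = n) (hg : ∀ p : ℕ, p < n → g (p : Int) = ys.getD p "")
    (hk : 2 ≤ k) (hkn : k ≤ (n : Int)) :
    (∃ j : Int, (0 ≤ j ∧ j < (n : Int) - k + 1) ∧
        ∀ t : Int, 1 ≤ t ∧ t < k → g (j + t) = g (j + t - 1))
      ↔ k ≤ pvMR ys := by
  have hcast : ((k.toNat : ℕ) : Int) = k := by omega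
  rw [← hcast, ← pvLineWin ys k.toNat (by omega) (by omega)]
  constructor
  · rintro ⟨j, ⟨hj0, hjlt⟩, hw⟩
    refine ⟨j.toNat, by omega, ?_⟩
    intro t ht1 htk
    have e1 : ((j.toNat + t : ℕ) : Int) = j + (t : Int) := by omega
    have e2 : ((j.toNat + t - 1 : ℕ) : Int) = j + (t : Int) - 1 := by omega
    rw [← hg (j.toNat + t) (by omega), ← hg (j.toNat + t - 1) (by omega), e1, e2]
    exact hw (t : Int) ⟨by omega, by omega⟩
  · rintro ⟨j, hjk, hw⟩
    refine ⟨(j : Int), ⟨by omega, by omega⟩, ?_⟩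
    rintro t ⟨ht1, htk⟩
    have e1 : (j : Int) + t = ((j + t.toNat : ℕ) : Int) := by omega
    have e2 : (j : Int) + t - 1 = ((j + t.toNat - 1 : ℕ) : Int) := by omega
    rw [e2, e1, hg (j + t.toNat) (by omega), hg (j + t.toNat - 1) (by omega)]
    exact hw t.toNat (by omega) (by omega)

-- k ≤ running max over a list iff k ≤ init or k ≤ some element's value
theorem pvFoldMax_iff {α : Type} (f : α → Int) :
    ∀ (l : List α) (a k : Int),
      k ≤ l.foldl (fun m i => max m (f i)) a ↔ k ≤ a ∨ ∃ i ∈ l, k ≤ f i := by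
  intro l
  induction l with
  | nil => intro a k; simp
  | cons x t ih =>
      intro a k
      simp only [List.foldl_cons]
      rw [ih (max a (f x)) k]
      constructor
      · rintro (h | ⟨i, hi, hk⟩)
        · rcases le_max_iff.mp h with h | h
          · exact Or.inl h
          · exact Or.inr ⟨x, by simp, h⟩
        · exact Or.inr ⟨i, List.mem_cons_of_mem _ hi, hk⟩
      · rintro (h | ⟨i, hi, hk⟩)
        · exact Or.inl (le_trans h (le_max_left _ _))
        · rcases List.mem_cons.mp hi with rfl | hi
          · exact Or.inl (le_trans hk (le_max_right _ _))
          · exact Or.inr ⟨i, hi, hk⟩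

-- the interleaved step written with one combined max
theorem pvCombineMax {α : Type} (ra ca : α → Int) (l : List α) (a : Int) :
    l.foldl (fun m i => max (max m (ra i)) (ca i)) a
      = l.foldl (fun m i => max m (max (ra i) (ca i))) a :=
  PySem.List.foldl_congr_mem _ _ _ _ (fun s i _ => max_assoc s (ra i) (ca i))

-- binary search returns the unique M with lo ≤ M ≤ hi whose feasibility splits at M
theorem pvBsearch_eq (board : List (List String)) (N M : Int) :
    ∀ (fuel : ℕ) (lo hi : Int), (hi - lo).toNat ≤ fuel →
      lo ≤ M → M ≤ hi →
      (∀ k : Int, lo < k → k ≤ hi → (pvOk board N k = true ↔ k ≤ M)) →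
      pvBsearch board N fuel lo hi = M := by
  intro fuel
  induction fuel with
  | zero =>
      intro lo hi hf h1 h2 _
      simp only [pvBsearch]
      omega
  | succ n ih =>
      intro lo hi hf h1 h2 hiff
      simp only [pvBsearch]
      by_cases hlt : lo < hi
      · rw [if_pos hlt]
        have hmid : lo < PySem.Int.floordiv (lo + hi + 1) 2 ∧
            PySem.Int.floordiv (lo + hi + 1) 2 ≤ hi := by
          rw [PySem.Int.floordiv_eq_ediv_of_pos (by omega : (0:Int) < 2)]
          omega
        by_cases hok : pvOk board N (PySem.Int.floordiv (lo + hi + 1) 2) = true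
        · rw [if_pos hok]
          have hM : PySem.Int.floordiv (lo + hi + 1) 2 ≤ M :=
            (hiff _ hmid.1 hmid.2).mp hok
          refine ih _ _ ?_ hM h2 (fun k hk1 hk2 => hiff k (by omega) hk2)
          rw [PySem.Int.floordiv_eq_ediv_of_pos (by omega : (0:Int) < 2)] at hmid ⊢
          omega
        · rw [if_neg hok]
          have hM : M ≤ PySem.Int.floordiv (lo + hi + 1) 2 - 1 := by
            by_contra hcon
            exact hok ((hiff _ hmid.1 hmid.2).mpr (by omega))
          refine ih _ _ ?_ h1 hM (fun k hk1 hk2 => hiff k hk1 (by omega))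
          rw [PySem.Int.floordiv_eq_ediv_of_pos (by omega : (0:Int) < 2)] at hmid ⊢
          omega
      · rw [if_neg hlt]
        omega

-- pvMR of a nonempty line is at most its length
theorem pvMR_le_length (ys : List String) (h : 1 ≤ ys.length) :
    pvMR ys ≤ (ys.length : Int) := by
  rw [pvMR_eq]
  have h1 := pvStreak_le_length (pvEqs ys)
  rw [pvEqs_length] at h1
  have : ((ys.length - 1 : ℕ) : Int) = (ys.length : Int) - 1 := by omega
  omega

-- both sides equal 1 when N ≤ 1 (A's inner loops are empty; B's search interval is [1,1])
theorem pvSmall_A (board : List (List String)) (N : Int) (hN : N ≤ 1) :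
    cnt_max board N = 1 := by
  by_cases h : N ≤ 0
  · unfold cnt_max
    rw [PySem.List.pyRange_one_eq_nil h]
    simp
  · have hN1 : N = 1 := by omega
    subst hN1
    have e0 : PySem.List.pyRange 0 1 1 = [0] := by decide
    have e1 : PySem.List.pyRange 1 1 1 = ([] : List Int) := by decide
    unfold cnt_max
    rw [e0, e1]
    simp

theorem pvSmall_B (board : List (List String)) (N : Int) (hN : N ≤ 1) :
    cnt_max_alt board N = 1 := by
  unfold cnt_max_alt
  have h1 : max N 1 = 1 := by omega
  rw [h1]
  simp [pvBsearch]

-- ===== VERDICT (by name: the statement is the Claim_ definition above) =====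
theorem cnt_max_spec : Claim_equal_cnt_max := by
  intro board N _hDom hPre
  unfold Spec_cnt_max
  by_cases hN : N ≤ 1
  · rw [pvSmall_A board N hN, pvSmall_B board N hN]
  · rw [not_le] at hN
    have hPre' : N ≤ (board.length : Int) ∧ ∀ row ∈ board.take N.toNat, N ≤ (row.length : Int) := by
      rcases hPre with h | h
      · omega
      · exact h
    obtain ⟨hlen, hrowlen⟩ := hPre'
    set n : ℕ := N.toNat with hn
    have hNn : N = (n : Int) := by omega
    set rowf : Int → List String := fun i =>
      PySem.List.slice (PySem.List.pyGetD board i []) none (some N) with hrowf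
    set colf : Int → List String := fun i =>
      (List.range n).map (fun r => (board.getD r []).getD i.toNat "") with hcolf
    have hboardlen : n ≤ board.length := by omega
    have hrow_eq : ∀ k : ℕ, k < n → rowf (k : Int) = (board.getD k []).take n := by
      intro k hk
      simp only [hrowf]
      rw [PySem.List.slice_to _ (by omega)]
      rw [PySem.List.pyGetD_natCast]
    have hrowlen' : ∀ k : ℕ, k < n → n ≤ (board.getD k []).length := by
      intro k hk
      have hmem : board.getD k [] ∈ board.take n := by
        have hk' : k < (board.take n).length := by simp; omega
        have : (board.take n).getD k [] ∈ board.take n := by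
          rw [List.getD_eq_getElem _ _ hk']
          exact List.getElem_mem _
        rwa [pvGetDTake board [] n k hk hboardlen] at this
      have := hrowlen _ hmem
      omega
    have hrowf_len : ∀ k : ℕ, k < n → (rowf (k : Int)).length = n := by
      intro k hk
      rw [hrow_eq k hk, List.length_take]
      have := hrowlen' k hk
      omega
    have hcol_len : ∀ i : Int, (colf i).length = n := by
      intro i; simp [hcolf]
    -- getter agreement for row lines
    have hgrow : ∀ i : Int, 0 ≤ i → i < N →
        ∀ k : ℕ, k < n →
          PySem.List.pyGetD (PySem.List.pyGetD board i []) (k : Int) "" = (rowf i).getD k "" := by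
      intro i h0 hiN k hk
      have hi : i = ((i.toNat : ℕ) : Int) := by omega
      have hitn : (i.toNat : ℕ) < n := by omega
      rw [hi]
      simp only [PySem.List.pyGetD_natCast]
      rw [hrow_eq i.toNat hitn]
      rw [pvGetDTake _ "" n k hk (hrowlen' i.toNat hitn)]
    -- getter agreement for column lines
    have hgcol : ∀ i : Int, 0 ≤ i → i < N →
        ∀ k : ℕ, k < n →
          PySem.List.pyGetD (PySem.List.pyGetD board (k : Int) []) i "" = (colf i).getD k "" := by
      intro i h0 hiN k hk
      have hcl : (colf i).getD k "" = (board.getD k []).getD i.toNat "" := by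
        simp only [hcolf]
        have hk' : k < ((List.range n).map (fun r => (board.getD r []).getD i.toNat "")).length := by
          simp; omega
        rw [List.getD_eq_getElem _ _ hk']
        simp
      rw [hcl]
      simp only [PySem.List.pyGetD_natCast]
      have hi : i = ((i.toNat : ℕ) : Int) := by omega
      rw [hi, PySem.List.pyGetD_natCast, Int.toNat_natCast]
    -- A equals the canonical interleaved max over lines
    have hA : cnt_max board N
        = (PySem.List.pyRange 0 N 1).foldl
            (fun m i => max (max m (pvMR (rowf i))) (pvMR (colf i))) 1 := by
      unfold cnt_max
      refine pvFoldCongrGE _ _ ?_ _ ?_ 1 le_rfl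
      · intro m x hm
        calc (1 : Int) ≤ m := hm
          _ ≤ max m (pvMR (rowf x)) := le_max_left _ _
          _ ≤ max (max m (pvMR (rowf x))) (pvMR (colf x)) := le_max_left _ _
      · intro m i hmem hm
        obtain ⟨h0, hiN⟩ := (PySem.List.mem_pyRange_one).mp hmem
        have hi : i = ((i.toNat : ℕ) : Int) := by omega
        have hitn : (i.toNat : ℕ) < n := by omega
        have hlr : (rowf i).length = n := by rw [hi]; exact hrowf_len i.toNat hitn
        have hlrN : ((rowf i).length : Int) = N := by rw [hlr]; omega
        have hlc : (colf i).length = n := hcol_len i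
        have hlcN : ((colf i).length : Int) = N := by rw [hlc]; omega
        have e1 : (PySem.List.pyRange 1 N 1).foldl (fun (p : Int × Int) j =>
            if PySem.List.pyGetD (PySem.List.pyGetD board i []) j "" =
               PySem.List.pyGetD (PySem.List.pyGetD board i []) (j - 1) "" then
              (max p.1 (p.2 + 1), p.2 + 1)
            else (p.1, 1)) (m, 1)
            = ((rowf i).zip ((rowf i).drop 1)).foldl pvStepA (m, 1) := by
          rw [← hlrN]
          exact pvIdxLine pvStepA
            (fun j => PySem.List.pyGetD (PySem.List.pyGetD board i []) j "")
            (rowf i) (fun k hk => hgrow i h0 hiN k (hlr ▸ hk)) (m, 1)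
        have e2 : ∀ init : Int × Int, (PySem.List.pyRange 1 N 1).foldl (fun (p : Int × Int) j =>
            if PySem.List.pyGetD (PySem.List.pyGetD board j []) i "" =
               PySem.List.pyGetD (PySem.List.pyGetD board (j - 1) []) i "" then
              (max p.1 (p.2 + 1), p.2 + 1)
            else (p.1, 1)) init
            = ((colf i).zip ((colf i).drop 1)).foldl pvStepA init := by
          intro init
          rw [← hlcN]
          exact pvIdxLine pvStepA
            (fun j => PySem.List.pyGetD (PySem.List.pyGetD board j []) i "")
            (colf i) (fun k hk => hgcol i h0 hiN k (hlc ▸ hk)) init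
        simp only [pvMR]
        rw [e1, e2, pvA_max ((rowf i).zip ((rowf i).drop 1)) m 1 1 hm (by omega)]
        rw [pvA_max ((colf i).zip ((colf i).drop 1))
              (max m (((((rowf i).zip ((rowf i).drop 1))).foldl pvStepB (1, 1)).1)) 1 1
              (le_trans hm (le_max_left _ _)) (by omega)]
    set M : Int := (PySem.List.pyRange 0 N 1).foldl
        (fun m i => max m (max (pvMR (rowf i)) (pvMR (colf i)))) 1 with hM
    have hAM : cnt_max board N = M := by rw [hA, pvCombineMax]
    have hchar : ∀ k : Int,
        k ≤ M ↔ k ≤ 1 ∨ ∃ i ∈ PySem.List.pyRange 0 N 1, k ≤ max (pvMR (rowf i)) (pvMR (colf i)) := by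
      intro k
      rw [hM]
      exact pvFoldMax_iff _ _ _ _
    have hM1 : 1 ≤ M := (hchar 1).mpr (Or.inl le_rfl)
    have hMN : M ≤ N := by
      rcases (hchar M).mp le_rfl with h | ⟨i, hi, h⟩
      · omega
      · obtain ⟨h0, hiN⟩ := (PySem.List.mem_pyRange_one).mp hi
        have hitn : (i.toNat : ℕ) < n := by omega
        have hii : i = ((i.toNat : ℕ) : Int) := by omega
        have hlr : (rowf i).length = n := by rw [hii]; exact hrowf_len i.toNat hitn
        have hr := pvMR_le_length (rowf i) (by rw [hlr]; omega)
        have hc := pvMR_le_length (colf i) (by rw [hcol_len i]; omega)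
        rw [hlr] at hr
        rw [hcol_len i] at hc
        rcases le_max_iff.mp h with h' | h' <;> omega
    -- feasibility splits at M
    have hOk : ∀ k : Int, 1 < k → k ≤ N → (pvOk board N k = true ↔ k ≤ M) := by
      intro k hk1 hkN
      have hwrow : ∀ i : Int, 0 ≤ i → i < N →
          ((∃ j : Int, (0 ≤ j ∧ j < (n : Int) - k + 1) ∧
              ∀ t : Int, 1 ≤ t ∧ t < k →
                PySem.List.pyGetD (PySem.List.pyGetD board i []) (j + t) "" =
                PySem.List.pyGetD (PySem.List.pyGetD board i []) (j + t - 1) "")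
            ↔ k ≤ pvMR (rowf i)) := by
        intro i h0 hiN
        have hitn : (i.toNat : ℕ) < n := by omega
        have hii : i = ((i.toNat : ℕ) : Int) := by omega
        exact pvGetWin (fun x => PySem.List.pyGetD (PySem.List.pyGetD board i []) x "")
          (rowf i) n k (by rw [hii]; exact hrowf_len i.toNat hitn)
          (fun p hp => hgrow i h0 hiN p hp) (by omega) (by omega)
      have hwcol : ∀ i : Int, 0 ≤ i → i < N →
          ((∃ j : Int, (0 ≤ j ∧ j < (n : Int) - k + 1) ∧
              ∀ t : Int, 1 ≤ t ∧ t < k →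
                PySem.List.pyGetD (PySem.List.pyGetD board (j + t) []) i "" =
                PySem.List.pyGetD (PySem.List.pyGetD board (j + t - 1) []) i "")
            ↔ k ≤ pvMR (colf i)) := by
        intro i h0 hiN
        exact pvGetWin (fun x => PySem.List.pyGetD (PySem.List.pyGetD board x []) i "")
          (colf i) n k (hcol_len i)
          (fun p hp => hgcol i h0 hiN p hp) (by omega) (by omega)
      unfold pvOk
      simp only [List.any_eq_true, List.all_eq_true, Bool.or_eq_true, beq_iff_eq,
        PySem.List.mem_pyRange_one]
      constructor
      · rintro ⟨i, ⟨h0, hiN⟩, j, ⟨hj0, hjlt⟩, hwin⟩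
        refine (hchar k).mpr (Or.inr ⟨i, (PySem.List.mem_pyRange_one).mpr ⟨h0, hiN⟩, ?_⟩)
        rcases hwin with hw | hw
        · exact le_trans ((hwrow i h0 hiN).mp
            ⟨j, ⟨hj0, by omega⟩, fun t ht => hw t ⟨ht.1, ht.2⟩⟩) (le_max_left _ _)
        · exact le_trans ((hwcol i h0 hiN).mp
            ⟨j, ⟨hj0, by omega⟩, fun t ht => hw t ⟨ht.1, ht.2⟩⟩) (le_max_right _ _)
      · intro hkM
        rcases (hchar k).mp hkM with h | ⟨i, hi, h⟩
        · omega
        · obtain ⟨h0, hiN⟩ := (PySem.List.mem_pyRange_one).mp hi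
          rcases le_max_iff.mp h with h' | h'
          · obtain ⟨j, ⟨hj0, hjlt⟩, hw⟩ := (hwrow i h0 hiN).mpr h'
            exact ⟨i, ⟨h0, hiN⟩, j, ⟨hj0, by omega⟩, Or.inl (fun t ht => hw t ht)⟩
          · obtain ⟨j, ⟨hj0, hjlt⟩, hw⟩ := (hwcol i h0 hiN).mpr h'
            exact ⟨i, ⟨h0, hiN⟩, j, ⟨hj0, by omega⟩, Or.inr (fun t ht => hw t ht)⟩
    -- put it together via binary-search correctness
    have hB : cnt_max_alt board N = M := by
      unfold cnt_max_alt
      have hmax : max N 1 = N := by omega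
      rw [hmax]
      exact pvBsearch_eq board N M ((N - 1).toNat) 1 N (by omega) hM1 hMN
        (fun k hk1 hk2 => hOk k hk1 hk2)
    rw [hAM, hB]
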